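-- pv_equiv track=rewrite | github.com/Nghia03092004/nghia03092004.github.io | project_euler/problem_536/solution.py | check
-- ===== SOURCE A (Python) =====
-- def check(m):
--     """Check if m satisfies the Korselt-like condition."""
--     mp3 = m + 3
--     temp = m
--     p = 2
--     while p * p <= temp:
--         if temp % p == 0:
--             temp //= p
--             if temp % p == 0:
--                 return False  # not squarefree
--             if mp3 % (p - 1) != 0:
--                 return False
--         p += 1
--     if temp > 1:
--         if mp3 % (temp - 1) != 0:
--             return False
--     return True
-- ===== SOURCE B (Python) =====
-- def _is_prime(d):
--     """Trial-division primality test."""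
--     i = 2
--     while i * i <= d:
--         if d % i == 0:
--             return False
--         i += 1
--     return True
--
--
-- def check(m):
--     """Check if m satisfies the Korselt-like condition."""
--     mp3 = m + 3
--     prod = 1
--     d = 2
--     while d * d <= m:
--         if m % d == 0 and _is_prime(d):
--             if m % (d * d) == 0:
--                 return False
--             if mp3 % (d - 1) != 0:
--                 return False
--             prod *= d
--         d += 1
--     r = m // prod
--     if r > 1:
--         if mp3 % (r - 1) != 0:
--             return False
--     return True
-- ===== Notes on version B (the rewrite author's own statement) =====
-- stated objective: alternative
-- what changed: B never mutates m: it scans every candidate divisor d up to sqrt(m) of the FIXED m, filters with a separate trial-division primality helper, checks squarefreeness by m % (d*d) and the Korselt condition per prime, accumulates the product of the small prime factors, and recovers the one possible large prime cofactor by a single division m // prod at the end, instead of A's loop that repeatedly divides a shrinking temp and tests its residue.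
import Mathlib
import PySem

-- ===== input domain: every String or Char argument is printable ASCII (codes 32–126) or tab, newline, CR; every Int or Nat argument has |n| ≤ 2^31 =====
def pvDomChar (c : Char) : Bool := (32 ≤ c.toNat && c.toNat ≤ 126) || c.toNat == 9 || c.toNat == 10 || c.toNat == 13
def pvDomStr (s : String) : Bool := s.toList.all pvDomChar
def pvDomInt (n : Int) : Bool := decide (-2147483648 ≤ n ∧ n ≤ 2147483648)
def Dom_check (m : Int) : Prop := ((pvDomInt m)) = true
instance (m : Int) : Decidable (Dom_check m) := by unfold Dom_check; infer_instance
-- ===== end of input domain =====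

-- B scans candidate divisors of the FIXED m with a separate primality helper and a product
-- accumulator instead of A's loop over a shrinking quotient; same return value, same cost class.

-- ===== PORT A =====
-- termination helpers for the trial-division loops (cited by the ports' decreasing_by)
theorem pv_fdiv_le (temp : Int) (p : Nat) (h : 0 ≤ temp) :
    PySem.Int.floordiv temp p ≤ temp := by
  rcases Nat.eq_zero_or_pos p with hp | hp
  · subst hp
    simpa [PySem.Int.floordiv] using h
  · have hp' : (0:Int) < (p:Int) := by exact_mod_cast hp
    rw [PySem.Int.floordiv_eq_ediv_of_pos hp']
    exact Int.ediv_le_self _ h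

theorem pv_p_le_temp {temp : Int} {p : Nat} (h : ((p:Int)) * p ≤ temp) : (p:Int) ≤ temp := by
  rcases Nat.eq_zero_or_pos p with hp | hp
  · subst hp; simpa using h
  · have hp' : (1:Int) ≤ (p:Int) := by exact_mod_cast hp
    nlinarith

theorem pv_loop_dec_div (temp : Int) (p : Nat) (t' : Int)
    (hg : ((p:Int)) * p ≤ temp) (hle : t' ≤ temp) :
    (t' + 1 - ((p+1 : Nat) : Int)).toNat < (temp + 1 - (p:Int)).toNat := by
  have := pv_p_le_temp hg
  push_cast
  omega

theorem pv_loop_dec_step (temp : Int) (p : Nat) (hg : ((p:Int)) * p ≤ temp) :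
    (temp + 1 - ((p+1 : Nat) : Int)).toNat < (temp + 1 - (p:Int)).toNat := by
  have := pv_p_le_temp hg
  push_cast
  omega

theorem pv_fdiv_le' (temp : Int) (p : Nat) (hg : ((p:Int)) * p ≤ temp) :
    PySem.Int.floordiv temp (p:Int) ≤ temp :=
  pv_fdiv_le temp p (le_trans (mul_self_nonneg _) hg)

-- A's while loop, literally: one division step per p, early returns as nested ifs
def checkLoopA (mp3 temp : Int) (p : Nat) : Bool :=
  if hg : ((p:Int)) * p ≤ temp then
    if PySem.Int.mod temp p = 0 then
      if PySem.Int.mod (PySem.Int.floordiv temp p) p = 0 then false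
      else if PySem.Int.mod mp3 ((p:Int) - 1) ≠ 0 then false
      else checkLoopA mp3 (PySem.Int.floordiv temp p) (p+1)
    else checkLoopA mp3 temp (p+1)
  else
    if 1 < temp then decide (PySem.Int.mod mp3 (temp - 1) = 0) else true
termination_by (temp + 1 - p).toNat
decreasing_by
  · exact pv_loop_dec_div temp p _ hg (pv_fdiv_le' temp p hg)
  · exact pv_loop_dec_step temp p hg

def check (m : Int) : Bool := checkLoopA (m + 3) m 2

-- ===== PORT B =====
-- Source B's _is_prime: trial division of d itself
def isPrimeLoop (d : Int) (i : Nat) : Bool :=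
  if hg : ((i:Int)) * i ≤ d then
    if PySem.Int.mod d i = 0 then false
    else isPrimeLoop d (i+1)
  else true
termination_by (d + 1 - i).toNat
decreasing_by
  · exact pv_loop_dec_step d i hg

-- Source B's main loop: scan candidate divisors d of the FIXED m, accumulate the product of
-- the small prime factors; afterwards the large cofactor is m // prod
def checkLoopB (mp3 m prod : Int) (d : Nat) : Bool :=
  if hg : ((d:Int)) * d ≤ m then
    if PySem.Int.mod m d = 0 ∧ isPrimeLoop d 2 = true then
      if PySem.Int.mod m ((d:Int) * d) = 0 then false
      else if PySem.Int.mod mp3 ((d:Int) - 1) ≠ 0 then false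
      else checkLoopB mp3 m (prod * d) (d+1)
    else checkLoopB mp3 m prod (d+1)
  else
    let r := PySem.Int.floordiv m prod
    if 1 < r then decide (PySem.Int.mod mp3 (r - 1) = 0) else true
termination_by (m + 1 - d).toNat
decreasing_by
  · exact pv_loop_dec_step m d hg
  · exact pv_loop_dec_step m d hg

def check_alt (m : Int) : Bool := checkLoopB (m + 3) m 1 2

-- ===== PRECONDITION & SPEC =====
def Spec_check (m : Int) (out : Bool) : Prop := out = check_alt m
instance (m : Int) (out : Bool) : Decidable (Spec_check m out) := by unfold Spec_check; infer_instance

-- ===== CLAIM (what is proved, stated in full; the proofs are below) =====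
def Claim_equal_check : Prop := ∀ (m : Int), Dom_check m → Spec_check m (check m)

-- ===== LEMMAS AND PROOFS =====

-- t has no divisor in [2, p)
def NoFacBelow (t : Int) (p : Nat) : Prop := ∀ j : Nat, 2 ≤ j → j < p → ¬ ((j:Int) ∣ t)

-- every prime divisor of prod is < p
def PrimesBelow (prod : Int) (p : Nat) : Prop := ∀ q : Int, Prime q → q ∣ prod → q < p

theorem isPrimeLoop_false_iff (d : Int) (i : Nat) :
    isPrimeLoop d i = false ↔ ∃ j : Nat, i ≤ j ∧ ((j:Int)) * j ≤ d ∧ (j:Int) ∣ d := by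
  fun_induction isPrimeLoop d i with
  | case1 i hg hmod =>
    refine iff_of_true rfl ⟨i, le_refl i, hg, (PySem.Int.mod_eq_zero_iff_dvd d i).mp hmod⟩
  | case2 i hg hmod ih =>
    rw [ih]
    constructor
    · rintro ⟨j, hij, hle, hdvd⟩
      exact ⟨j, by omega, hle, hdvd⟩
    · rintro ⟨j, hij, hle, hdvd⟩
      rcases Nat.eq_or_lt_of_le hij with h | h
      · exfalso
        subst h
        exact hmod ((PySem.Int.mod_eq_zero_iff_dvd d i).mpr hdvd)
      · exact ⟨j, by omega, hle, hdvd⟩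
  | case3 i hg =>
    refine iff_of_false (by simp) ?_
    rintro ⟨j, hij, hle, _⟩
    apply hg
    have h1 : ((i:Int)) ≤ (j:Int) := by exact_mod_cast hij
    have h2 : (0:Int) ≤ i := Int.natCast_nonneg i
    nlinarith

theorem prime_of_no_small_fac {t : Int} (h2 : 2 ≤ t)
    (h : ∀ j : Nat, 2 ≤ j → ((j:Int)) * j ≤ t → ¬ ((j:Int) ∣ t)) : Prime t := by
  rw [Int.prime_iff_natAbs_prime]
  have hn : (t.natAbs : Int) = t := Int.natAbs_of_nonneg (by omega)
  by_contra hnp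
  have h2n : 2 ≤ t.natAbs := by omega
  have hsq := Nat.minFac_sq_le_self (by omega : 0 < t.natAbs) hnp
  have hdvd := Nat.minFac_dvd t.natAbs
  have hmf2 : 2 ≤ t.natAbs.minFac := (Nat.minFac_prime (by omega : t.natAbs ≠ 1)).two_le
  refine h t.natAbs.minFac hmf2 ?_ ?_
  · calc ((t.natAbs.minFac : Int)) * t.natAbs.minFac
        = ((t.natAbs.minFac * t.natAbs.minFac : Nat) : Int) := by push_cast; ring
      _ ≤ ((t.natAbs : Nat) : Int) :=
        Int.ofNat_le.mpr (by nlinarith [hsq])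
      _ = t := hn
  · rw [← hn]
    exact_mod_cast Int.natCast_dvd_natCast.mpr hdvd

theorem isPrime_true_of_prime {d : Nat} (hp : Prime ((d:Int))) : isPrimeLoop d 2 = true := by
  by_contra h
  rw [Bool.not_eq_true, isPrimeLoop_false_iff] at h
  obtain ⟨j, hij, hle, hdvd⟩ := h
  have hdn : d.Prime := by
    have := Int.prime_iff_natAbs_prime.mp hp
    simpa using this
  have hjd : j ∣ d := Int.natCast_dvd_natCast.mp hdvd
  have hd2 : 2 ≤ d := hdn.two_le
  have hjlt : j < d := by
    have : ((j:Int)) * j ≤ d := hle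
    have h2j : (2:Int) ≤ (j:Int) := by exact_mod_cast hij
    have : (j:Int) < (d:Int) := by nlinarith
    exact_mod_cast this
  rcases (Nat.Prime.eq_one_or_self_of_dvd hdn j hjd) with h1 | h1 <;> omega

theorem prime_of_isPrime_true {d : Nat} (h2 : 2 ≤ d) (h : isPrimeLoop d 2 = true) :
    Prime ((d:Int)) := by
  refine prime_of_no_small_fac (by exact_mod_cast h2) ?_
  intro j hj hle hdvd
  have : isPrimeLoop d 2 = false :=
    (isPrimeLoop_false_iff d 2).mpr ⟨j, hj, hle, hdvd⟩
  rw [h] at this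
  simp at this

theorem prime_of_NF {t : Int} {p : Nat} (h2 : 2 ≤ t) (hlt : t < ((p:Int)) * p)
    (hNF : NoFacBelow t p) : Prime t := by
  refine prime_of_no_small_fac h2 ?_
  intro j hj hle hdvd
  refine hNF j hj ?_ hdvd
  have h2j : (2:Int) ≤ (j:Int) := by exact_mod_cast hj
  have : ((j:Int)) < (p:Int) := by nlinarith
  exact_mod_cast this

theorem prime_dvd_prime_pos_eq {q p : Int} (hq : Prime q) (hp : Prime p) (hd : q ∣ p)
    (h1 : 0 < q) (h2 : 0 < p) : q = p := by
  have hq' := Int.prime_iff_natAbs_prime.mp hq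
  have hp' := Int.prime_iff_natAbs_prime.mp hp
  have : q.natAbs = p.natAbs := (Nat.prime_dvd_prime_iff_eq hq' hp').mp (Int.natAbs_dvd_natAbs.mpr hd)
  omega

theorem PrimesBelow_succ {prod : Int} {d : Nat} (hPB : PrimesBelow prod d) :
    PrimesBelow prod (d+1) := by
  intro q hq hdvd
  have := hPB q hq hdvd
  push_cast
  push_cast at this
  omega

theorem PrimesBelow_mul {prod : Int} {d : Nat} (hPB : PrimesBelow prod d)
    (hp : Prime ((d:Int))) : PrimesBelow (prod * d) (d+1) := by
  intro q hq hdvd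
  rcases hq.2.2 prod d hdvd with h | h
  · have := hPB q hq h
    push_cast
    push_cast at this
    omega
  · by_cases hq0 : 0 < q
    · have hd2 : 2 ≤ d := by
        have := Int.prime_iff_natAbs_prime.mp hp
        simp only [Int.natAbs_natCast] at this
        exact this.two_le
      have := prime_dvd_prime_pos_eq hq hp h hq0 (by exact_mod_cast (by omega : 0 < d))
      push_cast
      omega
    · push_cast
      omega

theorem fireEq {m prod t : Int} {d : Nat} (h2 : 2 ≤ d) (hm : prod * t = m)
    (hPB : PrimesBelow prod d) (hT : t = 1 ∨ (Prime t ∧ ((d:Int)) ≤ t)) (ht : 0 < t)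
    (hmod : PySem.Int.mod m ((d:Nat)) = 0) (hpr : isPrimeLoop d 2 = true) :
    ((d:Int)) = t := by
  have hdp : Prime ((d:Int)) := prime_of_isPrime_true h2 hpr
  have hdm : ((d:Int)) ∣ m := (PySem.Int.mod_eq_zero_iff_dvd m d).mp hmod
  rw [← hm] at hdm
  rcases hdp.2.2 prod t hdm with h | h
  · have := hPB _ hdp h
    omega
  · rcases hT with h1 | ⟨hpt, _⟩
    · subst h1
      exact absurd (isUnit_of_dvd_one h) hdp.not_unit
    · exact prime_dvd_prime_pos_eq hdp hpt h (by exact_mod_cast (by omega : 0 < d)) ht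

-- B's tail phase: once only the (at most one) large prime cofactor t is left,
-- the rest of B's scan reduces to A's final check on t
theorem loopB_tail (mp3 m : Int) : ∀ (prod : Int) (d : Nat) (t : Int),
    2 ≤ d → 0 < prod → prod * t = m → 0 < t →
    (t = 1 ∨ (Prime t ∧ ((d:Int)) ≤ t)) → PrimesBelow prod d →
    checkLoopB mp3 m prod d =
      (if 1 < t then decide (PySem.Int.mod mp3 (t - 1) = 0) else true) := by
  intro prod d
  fun_induction checkLoopB mp3 m prod d with
  | case1 prod d hg hfire hsq =>
    intro t h2 hprod hm ht hT hPB
    exfalso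
    have heq : ((d:Int)) = t := fireEq h2 hm hPB hT ht hfire.1 hfire.2
    have hdp : Prime ((d:Int)) := prime_of_isPrime_true h2 hfire.2
    have hsq' : ((d:Int)) * d ∣ prod * t := by
      rw [hm]
      exact (PySem.Int.mod_eq_zero_iff_dvd m _).mp hsq
    rw [← heq] at hsq'
    have : ((d:Int)) ∣ prod := (mul_dvd_mul_iff_right (by exact_mod_cast (by omega : d ≠ 0) : ((d:Int)) ≠ 0)).mp hsq'
    have := hPB _ hdp this
    omega
  | case2 prod d hg hfire hsq hmp3 =>
    intro t h2 hprod hm ht hT hPB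
    have heq : ((d:Int)) = t := fireEq h2 hm hPB hT ht hfire.1 hfire.2
    rw [if_pos (by omega : (1:Int) < t), decide_eq_false (by rw [← heq]; exact hmp3)]
  | case3 prod d hg hfire hsq hmp3 ih =>
    intro t h2 hprod hm ht hT hPB
    have heq : ((d:Int)) = t := fireEq h2 hm hPB hT ht hfire.1 hfire.2
    have hdp : Prime ((d:Int)) := prime_of_isPrime_true h2 hfire.2
    rw [ih 1 (by omega) (by positivity) (by rw [mul_one, heq, hm]) one_pos (Or.inl rfl)
        (PrimesBelow_mul hPB hdp)]
    rw [if_pos (by omega : (1:Int) < t)]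
    simp only [not_not] at hmp3
    rw [← heq, decide_eq_true hmp3]
    simp
  | case4 prod d hg hfire ih =>
    intro t h2 hprod hm ht hT hPB
    refine ih t (by omega) hprod hm ht ?_ (PrimesBelow_succ hPB)
    rcases hT with h1 | ⟨hpt, hle⟩
    · exact Or.inl h1
    · refine Or.inr ⟨hpt, ?_⟩
      have hne : ((d:Int)) ≠ t := by
        intro heq
        apply hfire
        constructor
        · rw [PySem.Int.mod_eq_zero_iff_dvd, heq, ← hm]
          exact dvd_mul_left t prod
        · exact isPrime_true_of_prime (heq ▸ hpt)
      push_cast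
      omega
  | case5 prod d hg r hlt =>
    intro t h2 hprod hm ht hT hPB
    have hr : PySem.Int.floordiv m prod = t := by
      rw [PySem.Int.floordiv_eq_ediv_of_pos hprod, ← hm]
      exact Int.mul_ediv_cancel_left t (by omega)
    have hlt' : (1:Int) < t := hr ▸ hlt
    show decide (PySem.Int.mod mp3 (PySem.Int.floordiv m prod - 1) = 0) = _
    rw [hr, if_pos hlt']
  | case6 prod d hg r hlt =>
    intro t h2 hprod hm ht hT hPB
    have hr : PySem.Int.floordiv m prod = t := by
      rw [PySem.Int.floordiv_eq_ediv_of_pos hprod, ← hm]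
      exact Int.mul_ediv_cancel_left t (by omega)
    have hlt' : ¬ (1:Int) < t := fun h => hlt (show (1:Int) < PySem.Int.floordiv m prod from hr ▸ h)
    rw [if_neg hlt']

-- a prime p dividing t is genuinely prime once t has no factor below p
theorem primeOfDvdNF {t : Int} {p : Nat} (h2 : 2 ≤ p) (hpt : ((p:Int)) ∣ t)
    (hNF : NoFacBelow t p) : Prime ((p:Int)) := by
  refine prime_of_no_small_fac (by exact_mod_cast h2) ?_
  intro j hj hle hdvd
  refine hNF j hj ?_ (dvd_trans hdvd hpt)
  have h2j : (2:Int) ≤ (j:Int) := by exact_mod_cast hj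
  have h2p : (2:Int) ≤ (p:Int) := by exact_mod_cast h2
  have : ((j:Int)) < (p:Int) := by nlinarith
  exact_mod_cast this

-- B's squarefreeness test on the fixed m agrees with A's test on the current quotient
theorem sq_dvd_iff {m prod t : Int} {p : Nat} (h2 : 2 ≤ p) (hp : Prime ((p:Int)))
    (hm : prod * t = m) (hPB : PrimesBelow prod p) (hpt : ((p:Int)) ∣ t) :
    (PySem.Int.mod m (((p:Int)) * p) = 0) ↔
      PySem.Int.mod (PySem.Int.floordiv t p) p = 0 := by
  have hp0 : ((p:Int)) ≠ 0 := by exact_mod_cast (by omega : p ≠ 0)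
  have hppos : (0:Int) < (p:Int) := by exact_mod_cast (by omega : 0 < p)
  have hpd : ¬ ((p:Int)) ∣ prod := fun h => absurd (hPB _ hp h) (lt_irrefl _)
  rw [PySem.Int.mod_eq_zero_iff_dvd, PySem.Int.mod_eq_zero_iff_dvd,
    PySem.Int.floordiv_eq_ediv_of_pos hppos]
  have hsplit : ((p:Int)) * (t / p) = t := Int.mul_ediv_cancel' hpt
  constructor
  · intro h
    have h1 : ((p:Int)) * p ∣ t :=
      (((hp.coprime_iff_not_dvd).mpr hpd).mul_left
        ((hp.coprime_iff_not_dvd).mpr hpd)).dvd_of_dvd_mul_left (by rw [hm]; exact h)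
    rw [← hsplit] at h1
    exact (mul_dvd_mul_iff_left hp0).mp h1
  · intro h
    have h1 : ((p:Int)) * p ∣ t := by
      rw [← hsplit]
      exact mul_dvd_mul_left _ h
    rw [← hm]
    exact h1.mul_left prod

-- main correspondence: A's shrinking-quotient loop equals B's fixed-m scan
theorem loopAB (mp3 m : Int) : ∀ (t : Int) (p : Nat) (prod : Int),
    2 ≤ p → 0 < t → 0 < prod → prod * t = m →
    NoFacBelow t p → PrimesBelow prod p →
    checkLoopA mp3 t p = checkLoopB mp3 m prod p := by
  intro t p
  fun_induction checkLoopA mp3 t p with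
  | case1 t p hg hdvd hsq =>
    intro prod h2 ht hprod hm hNF hPB
    have hpt : ((p:Int)) ∣ t := (PySem.Int.mod_eq_zero_iff_dvd t p).mp hdvd
    have hp : Prime ((p:Int)) := primeOfDvdNF h2 hpt hNF
    have htm : t ≤ m := by nlinarith
    have hGb : ((p:Int)) * p ≤ m := le_trans hg htm
    rw [checkLoopB, dif_pos hGb,
      if_pos ⟨(PySem.Int.mod_eq_zero_iff_dvd m p).mpr (hpt.trans ⟨prod, by rw [← hm]; ring⟩),
        isPrime_true_of_prime hp⟩,
      if_pos ((sq_dvd_iff h2 hp hm hPB hpt).mpr hsq)]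
  | case2 t p hg hdvd hsq hmp3 =>
    intro prod h2 ht hprod hm hNF hPB
    have hpt : ((p:Int)) ∣ t := (PySem.Int.mod_eq_zero_iff_dvd t p).mp hdvd
    have hp : Prime ((p:Int)) := primeOfDvdNF h2 hpt hNF
    have htm : t ≤ m := by nlinarith
    have hGb : ((p:Int)) * p ≤ m := le_trans hg htm
    rw [checkLoopB, dif_pos hGb,
      if_pos ⟨(PySem.Int.mod_eq_zero_iff_dvd m p).mpr (hpt.trans ⟨prod, by rw [← hm]; ring⟩),
        isPrime_true_of_prime hp⟩,
      if_neg (fun h => hsq ((sq_dvd_iff h2 hp hm hPB hpt).mp h)),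
      if_pos hmp3]
  | case3 t p hg hdvd hsq hmp3 ih =>
    intro prod h2 ht hprod hm hNF hPB
    have hpt : ((p:Int)) ∣ t := (PySem.Int.mod_eq_zero_iff_dvd t p).mp hdvd
    have hp : Prime ((p:Int)) := primeOfDvdNF h2 hpt hNF
    have hppos : (0:Int) < (p:Int) := by exact_mod_cast (by omega : 0 < p)
    have htm : t ≤ m := by nlinarith
    have hGb : ((p:Int)) * p ≤ m := le_trans hg htm
    have hsplit : ((p:Int)) * PySem.Int.floordiv t p = t := by
      rw [PySem.Int.floordiv_eq_ediv_of_pos hppos]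
      exact Int.mul_ediv_cancel' hpt
    have htp : 0 < PySem.Int.floordiv t p := by nlinarith
    rw [checkLoopB, dif_pos hGb,
      if_pos ⟨(PySem.Int.mod_eq_zero_iff_dvd m p).mpr (hpt.trans ⟨prod, by rw [← hm]; ring⟩),
        isPrime_true_of_prime hp⟩,
      if_neg (fun h => hsq ((sq_dvd_iff h2 hp hm hPB hpt).mp h)),
      if_neg hmp3]
    refine ih (prod * p) (by omega) htp (by positivity) (by rw [mul_assoc, hsplit, hm]) ?_
      (PrimesBelow_mul hPB hp)
    intro j hj hjlt hjdvd
    rcases Nat.lt_succ_iff_lt_or_eq.mp hjlt with hlt | heq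
    · exact hNF j hj hlt (hjdvd.trans ⟨(p:Int), by rw [mul_comm]; exact hsplit.symm⟩)
    · subst heq
      exact hsq ((PySem.Int.mod_eq_zero_iff_dvd _ j).mpr hjdvd)
  | case4 t p hg hdvd ih =>
    intro prod h2 ht hprod hm hNF hPB
    have htm : t ≤ m := by nlinarith
    have hGb : ((p:Int)) * p ≤ m := le_trans hg htm
    rw [checkLoopB, dif_pos hGb, if_neg ?_]
    · refine ih prod (by omega) ht hprod hm ?_ (PrimesBelow_succ hPB)
      intro j hj hjlt hjdvd
      rcases Nat.lt_succ_iff_lt_or_eq.mp hjlt with hlt | heq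
      · exact hNF j hj hlt hjdvd
      · subst heq
        exact hdvd ((PySem.Int.mod_eq_zero_iff_dvd _ j).mpr hjdvd)
    · rintro ⟨hmm, hpr⟩
      have hp : Prime ((p:Int)) := prime_of_isPrime_true h2 hpr
      have hpm : ((p:Int)) ∣ prod * t := by
        rw [hm]
        exact (PySem.Int.mod_eq_zero_iff_dvd m p).mp hmm
      rcases hp.2.2 prod t hpm with h | h
      · exact absurd (hPB _ hp h) (lt_irrefl _)
      · exact hdvd ((PySem.Int.mod_eq_zero_iff_dvd t p).mpr h)
  | case5 t p hg hlt =>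
    intro prod h2 ht hprod hm hNF hPB
    rw [loopB_tail mp3 m prod p t h2 hprod hm ht ?_ hPB, if_pos hlt]
    refine Or.inr ⟨prime_of_NF hlt (lt_of_not_ge hg) hNF, ?_⟩
    by_contra hc
    rw [not_le] at hc
    have htn : ((t.toNat : Nat) : Int) = t := Int.toNat_of_nonneg (by omega)
    refine hNF t.toNat (by omega) (by omega) ?_
    rw [htn]
  | case6 t p hg hlt =>
    intro prod h2 ht hprod hm hNF hPB
    rw [loopB_tail mp3 m prod p t h2 hprod hm ht (Or.inl (by omega)) hPB, if_neg hlt]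

-- ===== VERDICT (by name: the statement is the Claim_ definition above) =====
theorem check_spec : Claim_equal_check := by
  intro m _
  unfold Spec_check check check_alt
  by_cases hm : 0 < m
  · exact loopAB (m+3) m m 2 1 (by omega) hm (by omega) (one_mul m)
      (by intro j hj hj'; omega)
      (by intro q hq hdvd; exact absurd (isUnit_of_dvd_one hdvd) hq.not_unit)
  · rw [checkLoopA, checkLoopB]
    have h4 : ¬ ((2:Nat):Int) * ((2:Nat):Int) ≤ m := by push_cast; omega
    rw [dif_neg h4, dif_neg h4]
    have hnot : ¬ (1:Int) < m := by omega
    simp [hnot]
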